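-- pv_equiv track=rewrite | github.com/DragunWF/Competitive-Programming | CodeWars/python/6_kyu/bracket_duplicates.py | string_parse
-- ===== SOURCE A (Python) =====
-- def string_parse(s: str) -> str:
--     if not type(s) is str:
--         return "Please enter a valid string"
--     if not s:
--         return ""
--     parsed_chunks = []
--     prev_char = s[0]
--     current_chunk = [prev_char]
--     for i, char in enumerate(s[1:]):
--         if char == prev_char:
--             if len(current_chunk) == 2:
--                 current_chunk.append("[")
--             current_chunk.append(char)
--         elif char != prev_char or i == len(s) - 1:
--             if len(current_chunk) > 2:
--                 current_chunk.append("]")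
--             parsed_chunks.append("".join(current_chunk))
--             current_chunk.clear()
--             current_chunk.append(char)
--         prev_char = char
--     if len(current_chunk) > 0:
--         parsed_chunks.append("".join(current_chunk))
--         if len(current_chunk) > 2:
--             parsed_chunks.append("]")
--     return "".join(parsed_chunks)
-- ===== SOURCE B (Python) =====
-- def string_parse(s):
--     if not type(s) is str:
--         return "Please enter a valid string"
--     out = []
--     i, n = 0, len(s)
--     while i < n:
--         j = i + 1
--         while j < n and s[j] == s[i]:
--             j += 1
--         c, k = s[i], j - i
--         out.append(c * k if k < 3 else c + c + "[" + c * (k - 2) + "]")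
--         i = j
--     return "".join(out)
-- ===== Notes on version B (the rewrite author's own statement) =====
-- stated objective: alternative
-- what changed: Replaces A's per-character state machine (a chunk list with bracket insertion mid-stream and a trailing flush) by a two-pointer scan that finds each maximal run of equal characters and formats it in one shot.
import Mathlib
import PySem

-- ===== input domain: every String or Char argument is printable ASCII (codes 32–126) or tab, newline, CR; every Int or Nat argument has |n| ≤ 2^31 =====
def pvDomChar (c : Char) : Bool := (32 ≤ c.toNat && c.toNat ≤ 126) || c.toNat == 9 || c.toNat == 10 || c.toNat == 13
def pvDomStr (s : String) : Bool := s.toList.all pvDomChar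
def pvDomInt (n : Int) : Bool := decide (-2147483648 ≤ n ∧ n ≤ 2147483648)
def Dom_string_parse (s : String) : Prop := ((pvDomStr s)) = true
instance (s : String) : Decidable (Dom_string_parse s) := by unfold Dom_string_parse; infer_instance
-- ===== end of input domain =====

-- B rewrites A's per-character state machine as a two-pointer run scan with per-run formatting (objective: alternative/idiomatic).

-- ===== PORT A =====
-- A's `current_chunk` (a Python list of 1-char strings) is ported as List Char;
-- parsed_chunks as List (List Char); the final "".join is the concatenation of all of them.
def aStep (slen : Nat) (st : List (List Char) × Char × List Char) (p : Int × Char) :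
    List (List Char) × Char × List Char :=
  let (parsed, prev, chunk) := st
  let (i, ch) := p
  if ch == prev then
    let chunk := if chunk.length == 2 then chunk ++ ['['] else chunk
    (parsed, ch, chunk ++ [ch])
  else if ch != prev || i == (slen : Int) - 1 then
    let chunk := if chunk.length > 2 then chunk ++ [']'] else chunk
    (parsed ++ [chunk], ch, [ch])
  else
    (parsed, ch, chunk)

def aFinish (st : List (List Char) × Char × List Char) : List Char :=
  (if st.2.2.length > 0 then st.1 ++ [st.2.2] ++ (if st.2.2.length > 2 then [[']']] else []) else st.1).flatten

def string_parse (s : String) : String :=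
  match h : s.toList with
  | [] => ""
  | c0 :: rest =>
    String.mk (aFinish ((PySem.List.enumerate rest 0).foldl (aStep s.toList.length) ([], c0, [c0])))

-- ===== PORT B =====
def runFmt (c : Char) (k : Nat) : List Char :=
  if k < 3 then List.replicate k c
  else c :: c :: '[' :: (List.replicate (k - 2) c ++ [']'])

def bGo : List Char → List Char
  | [] => []
  | c :: rest =>
    runFmt c ((rest.takeWhile (· == c)).length + 1) ++ bGo (rest.dropWhile (· == c))
termination_by l => l.length
decreasing_by
  simp only [List.length_cons]
  exact Nat.lt_succ_of_le (List.length_dropWhile_le _ _)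

def string_parse_alt (s : String) : String := String.mk (bGo s.toList)

-- ===== PRECONDITION & SPEC =====
def Spec_string_parse (s : String) (out : String) : Prop := out = string_parse_alt s
instance (s : String) (out : String) : Decidable (Spec_string_parse s out) := by unfold Spec_string_parse; infer_instance

-- ===== CLAIM (what is proved, stated in full; the proofs are below) =====
def Claim_equal_string_parse : Prop := ∀ (s : String), Dom_string_parse s → Spec_string_parse s (string_parse s)

-- ===== LEMMAS AND PROOFS =====

-- A's chunk while inside a run of n copies of c
def encode (c : Char) (n : Nat) : List Char :=
  if n < 3 then List.replicate n c else c :: c :: '[' :: List.replicate (n - 2) c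

-- finishing a chunk (append ']' iff length > 2) yields runFmt
lemma close_encode (c : Char) (n : Nat) (hn : 1 ≤ n) :
    (if (encode c n).length > 2 then encode c n ++ [']'] else encode c n) = runFmt c n := by
  unfold encode runFmt
  by_cases h : n < 3
  · have h2 : ¬ (List.replicate n c).length > 2 := by simp; omega
    simp only [h, if_pos, gt_iff_lt]
    rw [if_neg (by simpa using h2)]
  · have h2 : (c :: c :: '[' :: List.replicate (n - 2) c).length > 2 := by simp
    simp only [h, if_neg, not_false_iff]
    rw [if_pos h2]
    simp

lemma encode_succ (c : Char) (n : Nat) (hn : 1 ≤ n) :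
    (if (encode c n).length == 2 then encode c n ++ ['['] else encode c n) ++ [c]
      = encode c (n + 1) := by
  unfold encode
  rcases Nat.lt_or_ge n 3 with h | h
  · interval_cases n <;> simp [List.replicate]
  · have h1 : ¬ n < 3 := by omega
    have h2 : ¬ n + 1 < 3 := by omega
    have h3 : ((c :: c :: '[' :: List.replicate (n - 2) c).length == 2) = false := by
      simp
    simp only [h1, if_neg, not_false_iff, h2, h3, Bool.false_eq_true]
    have h4 : n + 1 - 2 = (n - 2) + 1 := by omega
    rw [h4, List.replicate_succ' (n := n - 2)]
    simp

-- main invariant: processing the rest of the string from a live run (prev = c, run length n)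
lemma main_lemma (L : Nat) : ∀ (l : List Char) (i0 : Int) (parsed : List (List Char)) (c : Char) (n : Nat), 1 ≤ n →
    aFinish ((PySem.List.enumerate l i0).foldl (aStep L) (parsed, c, encode c n))
    = parsed.flatten ++ runFmt c (n + (l.takeWhile (· == c)).length) ++ bGo (l.dropWhile (· == c)) := by
  intro l
  induction l with
  | nil =>
    intro i0 parsed c n hn
    have hlen : 0 < (encode c n).length := by
      unfold encode; split <;> simp <;> omega
    simp only [PySem.List.enumerate_nil, List.foldl_nil, List.takeWhile_nil, List.dropWhile_nil,
      List.length_nil, Nat.add_zero, bGo, aFinish]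
    simp only [gt_iff_lt, hlen, if_pos]
    have := close_encode c n hn
    by_cases h2 : (encode c n).length > 2
    · rw [if_pos h2]
      rw [if_pos h2] at this
      simp [← this]
    · rw [if_neg h2]
      rw [if_neg h2] at this
      simp [← this]
  | cons x xs ih =>
    intro i0 parsed c n hn
    rw [PySem.List.enumerate_cons, List.foldl_cons]
    by_cases hx : x = c
    · subst hx
      have hstep : aStep L (parsed, x, encode x n) (i0, x)
          = (parsed, x, encode x (n + 1)) := by
        simp only [aStep, beq_self_eq_true, if_pos]
        rw [encode_succ x n hn]
      rw [hstep, ih (i0 + 1) parsed x (n + 1) (by omega)]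
      simp only [List.takeWhile_cons, beq_self_eq_true, if_pos, List.dropWhile_cons,
        List.length_cons]
      have harg : n + 1 + (List.takeWhile (fun y => y == x) xs).length
          = n + ((List.takeWhile (fun y => y == x) xs).length + 1) := by omega
      rw [harg]
    · have hne : (x == c) = false := by simp [hx]
      have hstep : aStep L (parsed, c, encode c n) (i0, x)
          = (parsed ++ [if (encode c n).length > 2 then encode c n ++ [']'] else encode c n],
             x, encode x 1) := by
        simp only [aStep, hne, Bool.false_eq_true, if_neg, not_false_iff, bne]
        simp [encode]
      rw [hstep, ih (i0 + 1) _ x 1 (by omega)]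
      rw [close_encode c n hn]
      simp only [List.takeWhile_cons, hne, List.dropWhile_cons, Bool.false_eq_true, if_neg,
        not_false_iff, List.length_nil, Nat.add_zero]
      simp only [List.flatten_append, List.flatten_cons, List.flatten_nil, List.append_nil]
      rw [bGo]
      rw [Nat.add_comm]
      simp

-- ===== VERDICT (by name: the statement is the Claim_ definition above) =====
theorem string_parse_spec : Claim_equal_string_parse := by
  intro s _
  unfold Spec_string_parse string_parse string_parse_alt
  split
  · next h => rw [h]; rw [bGo]; exact (String.utf8ByteSize_eq_zero_iff.mp rfl).symm
  · next c0 rest h =>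
    simp only [h]
    have := main_lemma s.toList.length rest 0 [] c0 1 (by omega)
    have he : encode c0 1 = [c0] := by simp [encode, List.replicate]
    rw [he, h] at this
    rw [this, bGo, Nat.add_comm]
    simp
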